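-- pv_equiv track=rewrite | github.com/franciscastro/research-plan-composition | Code/adding-machine/addingmachine.py | addingMachine
-- ===== SOURCE A (Python) =====
-- def cleanList( numberList ):
--
-- 	# empty list, single element case
-- 	if ( numberList==[] or len(numberList)==1 ):
-- 		return numberList
--
-- 	# all other cases
-- 	else:
-- 		auxlist = []
-- 		i = 0
--
-- 		while( i < len(numberList) ):
-- 			# (current elt is 0) and (next index not out of bounds) and (next elt is 0)
-- 			if (  (numberList[i]==0 ) and ((i+1) != len(numberList)) and (numberList[i+1]==0) ):
-- 				return auxlist
-- 			else:
-- 				auxlist.append(numberList[i])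
-- 				i += 1
--
-- 		return numberList
--
-- def addingMachine( numberList ):
--
-- 	cleanedList = cleanList( numberList )
-- 	currentSum = 0
-- 	auxlist = []
--
-- 	# non-empty list
-- 	if (cleanedList != []):
--
-- 		for number in cleanedList:
-- 			# found non-zero number
-- 			if (number != 0):
-- 				currentSum += number
-- 				flagRunningSum = True
-- 			# found zero
-- 			else:
-- 				auxlist.append(currentSum)
-- 				currentSum = 0
-- 				flagRunningSum = False
--
-- 		# running sum is still present (list did not end in 0)
-- 		if (flagRunningSum):
-- 			auxlist.append(currentSum)
--
-- 		return auxlist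
--
-- 	# empty list
-- 	else:
-- 		return cleanedList
-- ===== SOURCE B (Python) =====
-- def addingMachine(numberList):
--     # find the cut point: first double-zero pair (only for lists of length > 1)
--     cut = numberList
--     if len(numberList) > 1:
--         for i in range(len(numberList) - 1):
--             if numberList[i] == 0 and numberList[i + 1] == 0:
--                 cut = numberList[:i]
--                 break
--     if not cut:
--         return []
--     # split the truncated list into segments at each single zero
--     segs = [[]]
--     for x in cut:
--         if x == 0:
--             segs.append([])
--         else:
--             segs[-1].append(x)
--     # a trailing zero means no running sum is pending: drop the last (empty) segment
--     if cut[-1] == 0: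
--         segs.pop()
--     return [sum(s) for s in segs]
-- ===== Notes on version B (the rewrite author's own statement) =====
-- stated objective: alternative
-- what changed: Replaces A's single scan with a running integer sum and a lazily-set flag by a three-stage decomposition: slice the list at the first double-zero, split the slice into explicit segment sublists at each zero (dropping the last segment after a trailing zero), then map sum over the segments.
import Mathlib
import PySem

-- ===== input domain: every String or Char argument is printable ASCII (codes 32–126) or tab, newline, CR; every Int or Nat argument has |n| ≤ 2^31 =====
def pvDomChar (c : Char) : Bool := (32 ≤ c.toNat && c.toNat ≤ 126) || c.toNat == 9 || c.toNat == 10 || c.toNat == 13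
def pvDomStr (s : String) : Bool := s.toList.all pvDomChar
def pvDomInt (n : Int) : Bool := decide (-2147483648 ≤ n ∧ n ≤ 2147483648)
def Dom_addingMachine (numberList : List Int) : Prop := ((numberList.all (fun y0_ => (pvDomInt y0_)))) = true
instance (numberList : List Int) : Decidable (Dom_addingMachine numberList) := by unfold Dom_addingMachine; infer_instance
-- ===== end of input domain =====

-- B replaces A's single running-sum scan by cut-slice / split-into-segments / map-sum (alternative decomposition, same cost).

-- ===== PORT A =====
-- cleanList's while loop as structural recursion on the unscanned suffix (same state: aux);
-- 'rest ≠ [] ∧ rest.headD 0 = 0' is Python's '(i+1) != len and numberList[i+1]==0'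
def cleanLoop (l : List Int) (aux : List Int) (rest : List Int) : List Int :=
  match rest with
  | [] => l
  | x :: rs =>
    if x = 0 ∧ rs ≠ [] ∧ rs.headD 0 = 0 then aux
    else cleanLoop l (aux ++ [x]) rs

def cleanList (l : List Int) : List Int :=
  if l = [] ∨ l.length = 1 then l else cleanLoop l [] l

-- body of A's for-loop: state (currentSum, auxlist, flagRunningSum)
def amStep (st : Int × List Int × Bool) (number : Int) : Int × List Int × Bool :=
  if number ≠ 0 then (st.1 + number, st.2.1, true) else (0, st.2.1 ++ [st.1], false)

def addingMachine (numberList : List Int) : List Int :=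
  let cleanedList := cleanList numberList
  if cleanedList ≠ [] then
    -- flagRunningSum is unassigned before the loop in Python; the loop runs (list nonempty)
    -- and every iteration assigns it, so the initial value false is never observed
    let st := cleanedList.foldl amStep (0, [], false)
    if st.2.2 then st.2.1 ++ [st.1] else st.2.1
  else cleanedList

-- ===== PORT B =====
-- B's cut-finding loop over i in range(len-1), as structural recursion on the suffix
-- starting at index i; numberList[:i] is l.take i
def cutGo (l : List Int) (i : Nat) (rest : List Int) : List Int :=
  match rest with
  | x :: y :: rs => if x = 0 ∧ y = 0 then l.take i else cutGo l (i + 1) (y :: rs)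
  | _ => l

def cutList (l : List Int) : List Int :=
  if l.length ≤ 1 then l else cutGo l 0 l

-- body of B's segment-building loop; segs[-1].append(x) = replace last segment
def segStep (segs : List (List Int)) (x : Int) : List (List Int) :=
  if x = 0 then segs ++ [[]] else segs.dropLast ++ [segs.getLastD [] ++ [x]]

def addingMachine_alt (numberList : List Int) : List Int :=
  let cut := cutList numberList
  if cut = [] then []
  else
    let segs := cut.foldl segStep [[]]
    let segs2 := if cut.getLastD 0 = 0 then segs.dropLast else segs
    segs2.map (fun s => s.sum)

-- ===== PRECONDITION & SPEC =====
def Spec_addingMachine (numberList : List Int) (out : List Int) : Prop := out = addingMachine_alt numberList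
instance (numberList : List Int) (out : List Int) : Decidable (Spec_addingMachine numberList out) := by unfold Spec_addingMachine; infer_instance

-- ===== CLAIM (what is proved, stated in full; the proofs are below) =====
def Claim_equal_addingMachine : Prop := ∀ (numberList : List Int), Dom_addingMachine numberList → Spec_addingMachine numberList (addingMachine numberList)

-- ===== LEMMAS AND PROOFS =====

-- a nonempty list maps to (map over dropLast) ++ [f last]
theorem map_dropLast_getLastD {α β : Type} (f : α → β) (d : α) :
    ∀ (l : List α), l ≠ [] → l.map f = l.dropLast.map f ++ [f (l.getLastD d)] := by
  intro l h
  have h2 : l.getLastD d = l.getLast h := by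
    rw [List.getLastD_eq_getLast?, List.getLast?_eq_some_getLast h]
    rfl
  conv_lhs => rw [← List.dropLast_append_getLast h]
  rw [List.map_append, h2]
  rfl

theorem cleanLoop_eq_cutGo (l : List Int) :
    ∀ (rest : List Int) (i : Nat), rest = l.drop i →
      cleanLoop l (l.take i) rest = cutGo l i rest := by
  intro rest
  induction rest with
  | nil => intro i _; rfl
  | cons x rs ih =>
    intro i hdrop
    cases rs with
    | nil => simp [cleanLoop, cutGo]
    | cons y rs' =>
      have hx : l[i]? = some x := by
        rw [← List.head?_drop, ← hdrop]; rfl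
      have htake : l.take i ++ [x] = l.take (i + 1) := by
        rw [List.take_add_one]
        simp [hx]
      have hdrop' : y :: rs' = l.drop (i + 1) := by
        have := congrArg List.tail hdrop
        simpa [List.tail_drop] using this
      by_cases hc : x = 0 ∧ y = 0
      · have hc' : x = 0 ∧ (y :: rs' ≠ [] ∧ (y :: rs').headD 0 = 0) := by
          exact ⟨hc.1, by simp, by simp [hc.2]⟩
        simp only [cleanLoop, cutGo]
        rw [if_pos hc', if_pos hc]
      · have hc' : ¬ (x = 0 ∧ (y :: rs' ≠ [] ∧ (y :: rs').headD 0 = 0)) := by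
          intro ⟨h1, _, h3⟩
          simp at h3
          exact hc ⟨h1, h3⟩
        simp only [cleanLoop, cutGo]
        rw [if_neg hc', if_neg hc, htake]
        exact ih (i + 1) hdrop'

theorem cleanList_eq_cutList (l : List Int) : cleanList l = cutList l := by
  unfold cleanList cutList
  by_cases h : l.length ≤ 1
  · have : l = [] ∨ l.length = 1 := by
      cases l with
      | nil => exact Or.inl rfl
      | cons a t => right; simp at h ⊢; omega
    simp [this, h]
  · have h2 : ¬ (l = [] ∨ l.length = 1) := by
      intro hc; cases hc with
      | inl hc => subst hc; simp at h
      | inr hc => omega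
    rw [if_neg h2, if_neg h]
    have := cleanLoop_eq_cutGo l l 0 (by simp)
    simpa using this

-- loop invariant linking A's (sum, aux) state with B's segment list
theorem fold_inv :
    ∀ (xs : List Int) (segs : List (List Int)) (flag : Bool), segs ≠ [] →
      (xs.foldl segStep segs ≠ [] ∧
       (xs.foldl amStep ((segs.getLastD []).sum, segs.dropLast.map List.sum, flag)).1
         = ((xs.foldl segStep segs).getLastD []).sum ∧
       (xs.foldl amStep ((segs.getLastD []).sum, segs.dropLast.map List.sum, flag)).2.1
         = (xs.foldl segStep segs).dropLast.map List.sum) := by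
  intro xs
  induction xs with
  | nil => intro segs flag h; exact ⟨h, rfl, rfl⟩
  | cons x xs ih =>
    intro segs flag h
    by_cases hx : x = 0
    · have hstep : segStep segs x = segs ++ [[]] := by simp [segStep, hx]
      have hA : amStep ((segs.getLastD []).sum, segs.dropLast.map List.sum, flag) x
          = (0, segs.dropLast.map List.sum ++ [(segs.getLastD []).sum], false) := by
        simp [amStep, hx]
      have hlast : ((segs ++ [[]] : List (List Int)).getLastD []).sum = 0 := by simp
      have hdrop : ((segs ++ [[]] : List (List Int)).dropLast).map List.sum
          = segs.dropLast.map List.sum ++ [(segs.getLastD []).sum] := by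
        rw [List.dropLast_concat]
        exact map_dropLast_getLastD List.sum [] segs h
      have := ih (segs ++ [[]]) false (by simp)
      rw [hlast, hdrop] at this
      simp only [List.foldl_cons, hstep, hA]
      exact this
    · have hstep : segStep segs x = segs.dropLast ++ [segs.getLastD [] ++ [x]] := by
        simp [segStep, hx]
      have hA : amStep ((segs.getLastD []).sum, segs.dropLast.map List.sum, flag) x
          = ((segs.getLastD []).sum + x, segs.dropLast.map List.sum, true) := by
        simp [amStep, hx]
      have hlast : ((segs.dropLast ++ [segs.getLastD [] ++ [x]] : List (List Int)).getLastD []).sum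
          = (segs.getLastD []).sum + x := by simp
      have hdrop : ((segs.dropLast ++ [segs.getLastD [] ++ [x]] : List (List Int)).dropLast).map List.sum
          = segs.dropLast.map List.sum := by rw [List.dropLast_concat]
      have := ih (segs.dropLast ++ [segs.getLastD [] ++ [x]]) true (by simp)
      rw [hlast, hdrop] at this
      simp only [List.foldl_cons, hstep, hA]
      exact this

-- A's flag after the loop records whether the last element was nonzero
theorem flag_last :
    ∀ (xs : List Int) (s : Int) (aux : List Int) (flag : Bool), xs ≠ [] →
      (xs.foldl amStep (s, aux, flag)).2.2 = decide (xs.getLastD 0 ≠ 0) := by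
  intro xs
  induction xs with
  | nil => intro _ _ _ h; exact absurd rfl h
  | cons x xs ih =>
    intro s aux flag _
    cases hxs : xs with
    | nil => by_cases hx : x = 0 <;> simp [amStep, hx]
    | cons y ys =>
      rw [List.foldl_cons]
      have hne : xs ≠ [] := by rw [hxs]; simp
      rw [← hxs]
      have := ih (amStep (s, aux, flag) x).1 (amStep (s, aux, flag) x).2.1
        (amStep (s, aux, flag) x).2.2 hne
      simp only at this
      rw [this]
      rw [hxs]
      simp [List.getLastD_cons]

-- ===== VERDICT (by name: the statement is the Claim_ definition above) =====
theorem addingMachine_spec : Claim_equal_addingMachine := by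
  intro l _
  unfold Spec_addingMachine addingMachine addingMachine_alt
  rw [cleanList_eq_cutList]
  by_cases hc : cutList l = []
  · simp [hc]
  · simp only [hc, if_neg, ne_eq, not_false_eq_true, if_true]
    have hinv := fold_inv (cutList l) [[]] false (by simp)
    have h0 : (([[]] : List (List Int)).getLastD []).sum = 0 := by simp
    have h1 : (([[]] : List (List Int)).dropLast).map List.sum = [] := by simp
    rw [h0, h1] at hinv
    obtain ⟨hne, hsum, haux⟩ := hinv
    have hflag := flag_last (cutList l) 0 [] false hc
    rw [hflag]
    have hsplit := map_dropLast_getLastD List.sum [] _ hne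
    by_cases hz : (cutList l).getLastD 0 = 0
    · simp only [hz, ne_eq, not_true_eq_false, decide_false, Bool.false_eq_true, if_false, if_pos rfl]
      exact haux
    · simp only [hz, ne_eq, not_false_eq_true, decide_true, if_true, if_neg hz]
      rw [haux, hsum, ← hsplit]
      simp
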